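-- pv_equiv track=rewrite | github.com/liupengsay/PyIsTheBestLang | src/dp/state_dp.py | lc_1681
-- ===== SOURCE A (Python) =====
-- from typing import List
-- from functools import lru_cache
-- from itertools import combinations
-- from math import inf
--
-- def lc_1681(nums: List[int], k: int) -> int:
--     # 模板：状态压缩和组合数选取结合使用
--
--     @lru_cache(None)
--     def dfs(state):
--         if not state:
--             return 0
--
--         lst = []
--         dct = dict()
--         for j in range(n):
--             if state & (1 << j) and nums[j] not in dct:
--                 dct[nums[j]] = j
--                 lst.append(nums[j])
--         if len(dct) < m:
--             return inf
--         res = inf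
--         for item in combinations(lst, m):
--             cur = max(item) - min(item)
--             if cur > res:
--                 break
--             nex = state
--             for num in item:
--                 nex ^= (1 << dct[num])
--             x = dfs(nex) + cur
--             res = res if res < x else x
--         return res
--
--     n = len(nums)
--     nums.sort()
--     if n % k:
--         return -1
--     m = n // k
--     ans = dfs((1 << n) - 1)
--     return ans if ans < inf else -1
-- ===== SOURCE B (Python) =====
-- def lc_1681(nums, k):
--     # bottom-up subset DP over a table of all bitmasks; per mask the distinct
--     # values are kept as (value, first index) pairs (no dict), combinations are
--     # enumerated over those pairs, and the early-cut scan is a recursion.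
--     nums.sort()
--     n = len(nums)
--     if k <= 0 or n % k:
--         return -1
--     m = n // k
--     full = (1 << n) - 1
--     dp = [None] * (full + 1)
--     dp[0] = 0
--     for mask in range(1, full + 1):
--         pairs = _firsts(nums, mask)
--         if len(pairs) < m:
--             continue
--         dp[mask] = _scan(_combos(pairs, m), mask, dp, None)
--     return dp[full] if dp[full] is not None else -1
--
--
-- def _firsts(nums, mask):
--     # (value, index) for the first occurrence of each distinct selected value
--     pairs = []
--     for j in range(len(nums)):
--         if mask >> j & 1 and all(w != nums[j] for w, _ in pairs):
--             pairs.append((nums[j], j))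
--     return pairs
--
--
-- def _combos(pairs, r):
--     # all r-element subsequences of pairs, in lexicographic (positional) order
--     if r == 0:
--         return [[]]
--     out = []
--     for i in range(len(pairs) - (r - 1)):
--         for tail in _combos(pairs[i + 1:], r - 1):
--             out.append([pairs[i]] + tail)
--     return out
--
--
-- def _scan(combos, mask, dp, best):
--     # scan combinations in order, cutting off once the spread exceeds best
--     if not combos:
--         return best
--     c = combos[0]
--     vals = [v for v, _ in c]
--     cur = max(vals) - min(vals)
--     if best is not None and cur > best:
--         return best
--     nex = mask
--     for _, j in c:
--         nex ^= 1 << j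
--     sub = dp[nex]
--     if sub is not None and (best is None or sub + cur < best):
--         best = sub + cur
--     return _scan(combos[1:], mask, dp, best)
-- ===== Notes on version B (the rewrite author's own statement) =====
-- stated objective: alternative
-- what changed: replaces A's top-down lru_cache recursion that builds a value->index dict per state with a bottom-up DP table filled for every bitmask in increasing order, representing the distinct selected values as (value, first index) pairs (no dict), generating combinations with an explicit recursive generator over those pairs and doing the early-cut minimum scan as a recursive helper instead of a for-loop with break
-- outside the precondition, e.g. on lc_1681([], -1): A returns 0, B returns -1
-- crash fix: A raises ZeroDivisionError when k = 0 and ValueError (negative combinations size) when k < 0 divides len(nums) with nums nonempty; B returns -1 on all of these. — e.g. on lc_1681([1, 1], -1): A raises ValueError, B returns -1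
import Mathlib
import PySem

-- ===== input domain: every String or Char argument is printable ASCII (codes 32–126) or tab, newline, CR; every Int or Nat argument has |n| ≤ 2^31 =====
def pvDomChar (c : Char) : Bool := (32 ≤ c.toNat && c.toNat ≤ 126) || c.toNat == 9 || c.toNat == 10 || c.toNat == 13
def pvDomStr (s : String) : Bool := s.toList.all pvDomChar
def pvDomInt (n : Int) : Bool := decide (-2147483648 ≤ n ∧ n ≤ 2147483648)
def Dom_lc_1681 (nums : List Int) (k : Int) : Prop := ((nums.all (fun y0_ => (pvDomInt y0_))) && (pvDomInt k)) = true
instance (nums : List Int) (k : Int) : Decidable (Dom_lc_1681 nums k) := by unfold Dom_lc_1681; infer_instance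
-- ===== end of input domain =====

-- B replaces A's top-down memoized recursion (value→index dict per state, itertools
-- combinations, for-loop with break) by a bottom-up DP table over all masks with
-- (value, first index) pairs, a recursive combination generator and a recursive
-- early-cut scan (objective: alternative).  Both Pythons sort `nums` in place; the
-- claim is about the return value only (B performs the same mutation).

-- ===== PORT A =====
-- Python `res < x` / `cur > res` with math.inf (none = inf)
def pvOLt : Option Int → Option Int → Bool
  | none, _ => false
  | some _, none => true
  | some a, some b => decide (a < b)

def pvGtO (c : Int) : Option Int → Bool
  | none => false
  | some b => decide (b < c)

-- A's loop `for j in range(n): …` building `lst` and `dct`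
def pvBuild (nums : List Int) (state : Nat) : List Int × PySem.Dict Int Nat :=
  (List.range nums.length).foldl
    (fun (acc : List Int × PySem.Dict Int Nat) j =>
      if state &&& (1 <<< j) ≠ 0 ∧ acc.2.contains (nums.getD j 0) = false then
        (acc.1 ++ [nums.getD j 0], acc.2.insert (nums.getD j 0) j)
      else acc)
    ([], PySem.Dict.empty)

-- itertools.combinations(lst, m): lexicographic (positional) m-subsequences
def pvCombosA : List Int → Nat → List (List Int)
  | _, 0 => [[]]
  | [], _ + 1 => []
  | x :: xs, r + 1 => (pvCombosA xs r).map (x :: ·) ++ pvCombosA xs (r + 1)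

-- A's dfs; the `if h : nex < state` guard only makes the recursion total (in every
-- execution Python reaches, the chosen bits are distinct set bits of `state`, so it holds)
def pvDfsA (nums : List Int) (m : Int) (state : Nat) : Option Int :=
  if state = 0 then some 0
  else
    let p := pvBuild nums state
    if (p.1.length : Int) < m then none
    else
      ((pvCombosA p.1 m.toNat).foldl
        (fun (acc : Option Int × Bool) item =>
          if acc.2 then acc
          else
            -- max/min of a combination; item is nonempty whenever Python runs this
            let cur := (PySem.List.max? item (fun y => y)).getD 0 - (PySem.List.min? item (fun y => y)).getD 0
            if pvGtO cur acc.1 then (acc.1, true)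
            else
              let nex := item.foldl (fun s v => s ^^^ (1 <<< p.2.getD v 0)) state
              let sub := if _h : nex < state then pvDfsA nums m nex else none
              let x := sub.map (· + cur)
              ((if pvOLt acc.1 x then acc.1 else x), false))
        (none, false)).1
termination_by state

def lc_1681 (nums : List Int) (k : Int) : Int :=
  let nums := PySem.List.sorted nums id false
  let n := nums.length
  if PySem.Int.mod (n : Int) k ≠ 0 then -1
  else
    let m := PySem.Int.floordiv (n : Int) k
    match pvDfsA nums m (1 <<< n - 1) with
    | some v => v
    | none => -1

-- ===== PORT B =====
-- _firsts in Source B: (value, index) pairs of first occurrences among the set bits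
def pvFirsts (nums : List Int) (mask : Nat) : List (Int × Nat) :=
  (List.range nums.length).foldl
    (fun (pairs : List (Int × Nat)) j =>
      if (mask >>> j) &&& 1 ≠ 0 ∧ pairs.all (fun p => p.1 != nums.getD j 0) = true then
        pairs ++ [(nums.getD j 0, j)]
      else pairs)
    []

-- _combos in Source B: r-element subsequences of the pair list, lexicographic order
def pvCombosP (pairs : List (Int × Nat)) (r : Nat) : List (List (Int × Nat)) :=
  match r with
  | 0 => [[]]
  | r + 1 =>
    (List.range (pairs.length - r)).flatMap
      (fun i => (pvCombosP (pairs.drop (i + 1)) r).map (pairs.getD i (0, 0) :: ·))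
termination_by r

-- _scan in Source B: recursive scan of the combinations with the early cut
def pvScan : List (List (Int × Nat)) → Nat → List (Option Int) → Option Int → Option Int
  | [], _, _, best => best
  | c :: rest, mask, dp, best =>
    let vals := c.map (fun p => p.1)
    let cur := (PySem.List.max? vals (fun y => y)).getD 0 - (PySem.List.min? vals (fun y => y)).getD 0
    let cut : Bool := match best with | none => false | some b => decide (b < cur)
    if cut then best
    else
      let nex := c.foldl (fun s p => s ^^^ (1 <<< p.2)) mask
      let best' :=
        match dp.getD nex none with
        | none => best
        | some sub =>
          match best with
          | none => some (sub + cur)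
          | some b => if sub + cur < b then some (sub + cur) else some b
      pvScan rest mask dp best'

-- the body of B's `for mask in …` loop
def pvStepB (nums : List Int) (m : Int) (dp : List (Option Int)) (mask : Nat) :
    List (Option Int) :=
  let pairs := pvFirsts nums mask
  if (pairs.length : Int) < m then dp          -- continue: dp[mask] stays None
  else dp.set mask (pvScan (pvCombosP pairs m.toNat) mask dp none)

def lc_1681_alt (nums : List Int) (k : Int) : Int :=
  let nums := PySem.List.sorted nums id false
  let n := nums.length
  if k ≤ 0 ∨ PySem.Int.mod (n : Int) k ≠ 0 then -1
  else
    let m := PySem.Int.floordiv (n : Int) k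
    let full := 1 <<< n - 1
    let dp := (List.range' 1 full).foldl (pvStepB nums m)
                ((List.replicate (full + 1) none).set 0 (some 0))
    match dp.getD full none with
    | some v => v
    | none => -1

-- ===== PRECONDITION & SPEC =====
-- Pre_ excludes k = 0 (A raises ZeroDivisionError) and k < 0 dividing len(nums):
-- there A raises ValueError for nonempty nums, and on empty nums A's 0 for an invalid
-- k < 0 is an accidental corner (both 0 and B's -1 are defensible).
def Pre_lc_1681 (nums : List Int) (k : Int) : Prop :=
  k ≠ 0 ∧ (0 < k ∨ ¬ ((k : Int) ∣ (nums.length : Int)))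
instance (nums : List Int) (k : Int) : Decidable (Pre_lc_1681 nums k) := by
  unfold Pre_lc_1681; infer_instance

def pvWitness_lc_1681 : List Int × Int := ([1, 2, 3, 4], 2)

-- A raises ZeroDivisionError when k = 0, and ValueError when k < 0 divides len(nums)
-- with nums nonempty; B returns -1 on all of these.
def Raises_lc_1681 (nums : List Int) (k : Int) : Prop :=
  k = 0 ∨ (k < 0 ∧ ((k : Int) ∣ (nums.length : Int)) ∧ nums ≠ [])
instance (nums : List Int) (k : Int) : Decidable (Raises_lc_1681 nums k) := by
  unfold Raises_lc_1681; infer_instance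

def pvRaiseWitness_lc_1681 : List Int × Int := ([1, 1], -1)
def pvRaiseWitnessOut_lc_1681 : Int := -1

def Spec_lc_1681 (nums : List Int) (k : Int) (out : Int) : Prop := out = lc_1681_alt nums k
instance (nums : List Int) (k : Int) (out : Int) : Decidable (Spec_lc_1681 nums k out) := by
  unfold Spec_lc_1681; infer_instance

-- ===== CLAIM (what is proved, stated in full; the proofs are below) =====
def Claim_equal_lc_1681 : Prop := ∀ (nums : List Int) (k : Int), Dom_lc_1681 nums k →
  Pre_lc_1681 nums k → Spec_lc_1681 nums k (lc_1681 nums k)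

def Claim_raises_lc_1681 : Prop :=
  (∀ (nums : List Int) (k : Int), Dom_lc_1681 nums k → Raises_lc_1681 nums k →
      ¬ Pre_lc_1681 nums k) ∧
  (Dom_lc_1681 (pvRaiseWitness_lc_1681.1) (pvRaiseWitness_lc_1681.2) ∧
   Raises_lc_1681 (pvRaiseWitness_lc_1681.1) (pvRaiseWitness_lc_1681.2) ∧
   lc_1681_alt (pvRaiseWitness_lc_1681.1) (pvRaiseWitness_lc_1681.2) = pvRaiseWitnessOut_lc_1681)

-- ===== LEMMAS AND PROOFS =====

-- A's dict of first indices, rebuilt from B's pair list (proof-side only)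
def pvDictOf (P : List (Int × Nat)) : PySem.Dict Int Nat :=
  P.foldl (fun d p => d.insert p.1 p.2) PySem.Dict.empty

theorem pvDictOf_snoc (P : List (Int × Nat)) (q : Int × Nat) :
    pvDictOf (P ++ [q]) = (pvDictOf P).insert q.1 q.2 := by
  simp [pvDictOf]

theorem pvDictOf_contains (P : List (Int × Nat)) (v : Int) :
    (pvDictOf P).contains v = decide (v ∈ P.map Prod.fst) := by
  induction P using List.reverseRecOn with
  | nil =>
    show PySem.Dict.empty.contains v = decide (v ∈ ([] : List Int))
    rw [PySem.Dict.contains_empty]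
    rfl
  | append_singleton l q ih =>
    rw [pvDictOf_snoc, PySem.Dict.contains_insert, ih, List.map_append]
    by_cases h : v = q.1
    · simp [h]
    · simp only [beq_eq_false_iff_ne.mpr h, Bool.false_or, List.mem_append,
        List.map_cons, List.map_nil, List.mem_singleton, decide_eq_decide]
      tauto

theorem pvDictOf_getD (P : List (Int × Nat)) (hnd : (P.map Prod.fst).Nodup)
    (p : Int × Nat) (hmem : p ∈ P) : (pvDictOf P).getD p.1 0 = p.2 := by
  induction P using List.reverseRecOn with
  | nil => cases hmem
  | append_singleton l q ih =>
    rw [pvDictOf_snoc, PySem.Dict.getD_insert]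
    rw [List.map_append, List.map_cons, List.map_nil] at hnd
    have hq : q.1 ∉ l.map Prod.fst := by
      intro hm
      exact (List.disjoint_of_nodup_append hnd) hm (by simp)
    rcases List.mem_append.mp hmem with h | h
    · have hne : p.1 ≠ q.1 := by
        intro he
        exact hq (he ▸ List.mem_map_of_mem h)
      rw [if_neg hne]
      exact ih (List.Nodup.of_append_left hnd) h
    · have : p = q := by simpa using h
      subst this
      rw [if_pos rfl]

-- the two bit tests agree
theorem pvBit_iff (mask j : Nat) :
    (mask &&& (1 <<< j) ≠ 0) ↔ ((mask >>> j) &&& 1 ≠ 0) := by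
  rw [Nat.one_shiftLeft, Nat.and_two_pow, Nat.and_one_is_mod,
      Nat.testBit, Nat.one_and_eq_mod_two, Nat.shiftRight_eq_div_pow]
  have h2 : (0 : Nat) < 2 ^ j := by positivity
  rcases Nat.mod_two_eq_zero_or_one (mask / 2 ^ j) with h | h <;> simp [h]

-- B's pair list carries exactly A's (lst, dct)
theorem pvBuild_aux (nums : List Int) (mask : Nat) :
    ∀ (l : List Nat) (P : List (Int × Nat)), (P.map Prod.fst).Nodup →
      (l.foldl
        (fun (acc : List Int × PySem.Dict Int Nat) j =>
          if mask &&& (1 <<< j) ≠ 0 ∧ acc.2.contains (nums.getD j 0) = false then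
            (acc.1 ++ [nums.getD j 0], acc.2.insert (nums.getD j 0) j)
          else acc)
        (P.map Prod.fst, pvDictOf P)
        = ((l.foldl
            (fun (pairs : List (Int × Nat)) j =>
              if (mask >>> j) &&& 1 ≠ 0 ∧ pairs.all (fun p => p.1 != nums.getD j 0) = true then
                pairs ++ [(nums.getD j 0, j)]
              else pairs) P).map Prod.fst,
           pvDictOf (l.foldl
            (fun (pairs : List (Int × Nat)) j =>
              if (mask >>> j) &&& 1 ≠ 0 ∧ pairs.all (fun p => p.1 != nums.getD j 0) = true then
                pairs ++ [(nums.getD j 0, j)]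
              else pairs) P))) ∧
      ((l.foldl
        (fun (pairs : List (Int × Nat)) j =>
          if (mask >>> j) &&& 1 ≠ 0 ∧ pairs.all (fun p => p.1 != nums.getD j 0) = true then
            pairs ++ [(nums.getD j 0, j)]
          else pairs) P).map Prod.fst).Nodup := by
  intro l
  induction l with
  | nil => intro P h; exact ⟨rfl, h⟩
  | cons j t ih =>
    intro P h
    simp only [List.foldl_cons]
    have hmem : (pvDictOf P).contains (nums.getD j 0) = false ↔
        (P.all (fun p => p.1 != nums.getD j 0) = true) := by
      rw [pvDictOf_contains, decide_eq_false_iff_not, List.all_eq_true]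
      constructor
      · intro hn p hp
        rw [bne_iff_ne]
        intro he
        exact hn (he ▸ List.mem_map_of_mem hp)
      · intro ha hm
        rcases List.mem_map.mp hm with ⟨p, hp, he⟩
        exact (bne_iff_ne.mp (ha p hp)) he
    by_cases hc : (mask >>> j) &&& 1 ≠ 0 ∧ P.all (fun p => p.1 != nums.getD j 0) = true
    · rw [if_pos hc, if_pos ⟨(pvBit_iff mask j).mpr hc.1, hmem.mpr hc.2⟩]
      have hnotin : nums.getD j 0 ∉ P.map Prod.fst := by
        intro hm
        rcases List.mem_map.mp hm with ⟨p, hp, he⟩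
        have := List.all_eq_true.mp hc.2 p hp
        simp [he] at this
      have h' : ((P ++ [(nums.getD j 0, j)]).map Prod.fst).Nodup := by
        rw [List.map_append]
        simp only [List.map_cons, List.map_nil]
        exact List.Nodup.append h (List.nodup_singleton _)
          (by simpa [List.disjoint_singleton] using hnotin)
      have := ih (P ++ [(nums.getD j 0, j)]) h'
      rw [List.map_append, pvDictOf_snoc] at this
      simpa using this
    · rw [if_neg hc, if_neg (by
        intro ⟨hb, hd⟩
        exact hc ⟨(pvBit_iff mask j).mp hb, hmem.mp hd⟩)]
      exact ih P h

theorem pvBuild_eq (nums : List Int) (mask : Nat) :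
    pvBuild nums mask = ((pvFirsts nums mask).map Prod.fst, pvDictOf (pvFirsts nums mask)) ∧
    ((pvFirsts nums mask).map Prod.fst).Nodup := by
  have := pvBuild_aux nums mask (List.range nums.length) [] (by simp)
  simpa [pvBuild, pvFirsts, pvDictOf] using this

theorem pvCombosA_nil_of_lt : ∀ (l : List Int) (r : Nat), l.length < r → pvCombosA l r = [] := by
  intro l
  induction l with
  | nil => intro r h; cases r with
    | zero => omega
    | succ r => rfl
  | cons x xs ih =>
    intro r h
    cases r with
    | zero => omega
    | succ r =>
      simp only [List.length_cons] at h
      simp [pvCombosA, ih r (by omega), ih (r + 1) (by omega)]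

-- B's combinations of pairs project to A's combinations of values
theorem pvCombos_map_fst : ∀ (r : Nat) (P : List (Int × Nat)),
    (pvCombosP P r).map (List.map Prod.fst) = pvCombosA (P.map Prod.fst) r := by
  intro r
  induction r with
  | zero =>
    intro P; rw [pvCombosP]
    cases P <;> rfl
  | succ r ihr =>
    intro P
    induction P with
    | nil =>
      rw [pvCombosP]
      simp [pvCombosA]
    | cons p P' ihl =>
      rw [pvCombosP]
      show ((List.range ((p :: P').length - r)).flatMap
          (fun i => (pvCombosP ((p :: P').drop (i + 1)) r).map ((p :: P').getD i (0, 0) :: ·))).map (List.map Prod.fst)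
        = pvCombosA ((p :: P').map Prod.fst) (r + 1)
      have hA : pvCombosA ((p :: P').map Prod.fst) (r + 1)
          = (pvCombosA (P'.map Prod.fst) r).map (p.1 :: ·) ++ pvCombosA (P'.map Prod.fst) (r + 1) := by
        simp [pvCombosA]
      rw [hA]
      have hlen : (p :: P').length - r = P'.length + 1 - r := by simp
      rw [hlen]
      by_cases hc : P'.length < r
      · have h0 : P'.length + 1 - r = 0 := by omega
        rw [h0]
        simp [pvCombosA_nil_of_lt (P'.map Prod.fst) r (by simpa using hc),
              pvCombosA_nil_of_lt (P'.map Prod.fst) (r + 1) (by simp; omega)]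
      · have h0 : P'.length + 1 - r = (P'.length - r) + 1 := by omega
        rw [h0, List.range_succ_eq_map, List.flatMap_cons, List.flatMap_map, List.map_append]
        congr 1
        · rw [← ihr P']
          simp [Function.comp]
        · simp only [Nat.succ_eq_add_one, List.drop_succ_cons, List.getD_cons_succ]
          rw [← ihl]
          conv_rhs => rw [pvCombosP]

-- combination members come from the pair list
theorem pvCombosP_mem : ∀ (r : Nat) (P : List (Int × Nat)) (c : List (Int × Nat)),
    c ∈ pvCombosP P r → ∀ x ∈ c, x ∈ P := by
  intro r
  induction r with
  | zero =>
    intro P c hc x hx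
    rw [pvCombosP] at hc
    simp at hc
    subst hc; cases hx
  | succ r ih =>
    intro P c hc x hx
    rw [pvCombosP] at hc
    rcases List.mem_flatMap.mp hc with ⟨i, hi, hc⟩
    rcases List.mem_map.mp hc with ⟨tail, htail, rfl⟩
    have hilt : i < P.length := by
      have := List.mem_range.mp hi; omega
    rcases List.mem_cons.mp hx with rfl | hx
    · rw [List.getD_eq_getElem P (0,0) hilt]
      exact List.getElem_mem _
    · exact List.mem_of_mem_drop (ih (P.drop (i + 1)) tail htail x hx)

-- once A's break flag is set the fold is constant
theorem pvFoldA_true (dct : PySem.Dict Int Nat) (mask : Nat) (nums : List Int) (m : Int)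
    (l : List (List Int)) (res : Option Int) :
    l.foldl
      (fun (acc : Option Int × Bool) item =>
        if acc.2 then acc
        else
          let cur := (PySem.List.max? item (fun y => y)).getD 0 - (PySem.List.min? item (fun y => y)).getD 0
          if pvGtO cur acc.1 then (acc.1, true)
          else
            let nex := item.foldl (fun s v => s ^^^ (1 <<< dct.getD v 0)) mask
            let sub := if _h : nex < mask then pvDfsA nums m nex else none
            let x := sub.map (· + cur)
            ((if pvOLt acc.1 x then acc.1 else x), false)) (res, true) = (res, true) := by
  induction l with
  | nil => rfl
  | cons c t ih => simpa using ih

-- A's flagged fold over the projected combinations IS B's recursive scan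
theorem pvScan_eq (nums : List Int) (m : Int) (mask : Nat) (dp : List (Option Int))
    (dct : PySem.Dict Int Nat)
    (hlook : ∀ nex : Nat, dp.getD nex none = (if _h : nex < mask then pvDfsA nums m nex else none)) :
    ∀ (lB : List (List (Int × Nat))) (res : Option Int),
      (∀ c ∈ lB, ∀ p ∈ c, dct.getD p.1 0 = p.2) →
      ((lB.map (List.map Prod.fst)).foldl
        (fun (acc : Option Int × Bool) item =>
          if acc.2 then acc
          else
            let cur := (PySem.List.max? item (fun y => y)).getD 0 - (PySem.List.min? item (fun y => y)).getD 0
            if pvGtO cur acc.1 then (acc.1, true)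
            else
              let nex := item.foldl (fun s v => s ^^^ (1 <<< dct.getD v 0)) mask
              let sub := if _h : nex < mask then pvDfsA nums m nex else none
              let x := sub.map (· + cur)
              ((if pvOLt acc.1 x then acc.1 else x), false))
        (res, false)).1 = pvScan lB mask dp res := by
  intro lB
  induction lB with
  | nil => intro res _; rfl
  | cons c rest ih =>
    intro res hdct
    rw [List.map_cons, List.foldl_cons]
    show _ = pvScan (c :: rest) mask dp res
    rw [show pvScan (c :: rest) mask dp res =
      (let vals := c.map (fun p => p.1)
       let cur := (PySem.List.max? vals (fun y => y)).getD 0 - (PySem.List.min? vals (fun y => y)).getD 0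
       let cut : Bool := match res with | none => false | some b => decide (b < cur)
       if cut then res
       else
         let nex := c.foldl (fun s p => s ^^^ (1 <<< p.2)) mask
         let best' :=
           match dp.getD nex none with
           | none => res
           | some sub =>
             match res with
             | none => some (sub + cur)
             | some b => if sub + cur < b then some (sub + cur) else some b
         pvScan rest mask dp best') from rfl]
    simp only [Bool.false_eq_true, if_false]
    have hvals : c.map (fun p => p.1) = c.map Prod.fst := rfl
    rw [hvals]
    set cur := (PySem.List.max? (c.map Prod.fst) (fun y => y)).getD 0 -
               (PySem.List.min? (c.map Prod.fst) (fun y => y)).getD 0 with hcur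
    have hcut : pvGtO cur res = (match res with | none => false | some b => decide (b < cur)) := by
      cases res <;> rfl
    rw [← hcut]
    by_cases hbr : pvGtO cur res = true
    · rw [if_pos hbr, if_pos hbr, pvFoldA_true]
    · rw [if_neg hbr, if_neg hbr]
      have hnex : (c.map Prod.fst).foldl (fun s v => s ^^^ (1 <<< dct.getD v 0)) mask
          = c.foldl (fun s p => s ^^^ (1 <<< p.2)) mask := by
        rw [List.foldl_map]
        apply List.foldl_ext
        intro a p hp
        rw [hdct c (List.mem_cons_self) p hp]
      rw [hnex, ← hlook]
      have hres' : ∀ r : Option Int,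
          (if pvOLt r ((dp.getD (c.foldl (fun s p => s ^^^ (1 <<< p.2)) mask) none).map (· + cur)) then r
            else (dp.getD (c.foldl (fun s p => s ^^^ (1 <<< p.2)) mask) none).map (· + cur))
          = (match dp.getD (c.foldl (fun s p => s ^^^ (1 <<< p.2)) mask) none with
             | none => r
             | some sub => match r with
               | none => some (sub + cur)
               | some b => if sub + cur < b then some (sub + cur) else some b) := by
        intro r
        cases hsub : dp.getD (c.foldl (fun s p => s ^^^ (1 <<< p.2)) mask) none with
        | none => cases r <;> simp [pvOLt]
        | some s =>
          cases r with
          | none => simp [pvOLt]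
          | some b =>
            simp only [Option.map_some, pvOLt]
            rcases lt_trichotomy b (s + cur) with h | h | h
            · simp [h, not_lt.mpr (le_of_lt h)]
            · simp [h]
            · simp [not_lt.mpr (le_of_lt h), h]
      rw [hres' res]
      exact ih _ (fun c' hc' => hdct c' (List.mem_cons_of_mem _ hc'))

theorem pvGetD_set (l : List (Option Int)) (i : Nat) (v : Option Int) (j : Nat)
    (hi : i < l.length) :
    (l.set i v).getD j none = if j = i then v else l.getD j none := by
  by_cases h : j = i
  · subst h; simp [List.getD_eq_getElem?_getD, hi]
  · rw [List.getD_eq_getElem?_getD, List.getD_eq_getElem?_getD,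
       List.getElem?_set_ne (fun hh => h hh.symm), if_neg h]

theorem pvStepB_correct (nums : List Int) (m : Int) (dp : List (Option Int)) (mask : Nat)
    (hm : 0 < mask) (hlen : mask < dp.length)
    (h1 : ∀ s : Nat, s < mask → dp.getD s none = pvDfsA nums m s)
    (h2 : ∀ s : Nat, mask ≤ s → dp.getD s none = none) :
    (pvStepB nums m dp mask).length = dp.length ∧
    (∀ s : Nat, s ≤ mask → (pvStepB nums m dp mask).getD s none = pvDfsA nums m s) ∧
    (∀ s : Nat, mask < s → (pvStepB nums m dp mask).getD s none = none) := by
  obtain ⟨hbuild, hnd⟩ := pvBuild_eq nums mask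
  have hlook : ∀ nex : Nat, dp.getD nex none =
      (if _h : nex < mask then pvDfsA nums m nex else none) := by
    intro nex
    by_cases h : nex < mask
    · rw [dif_pos h]; exact h1 nex h
    · rw [dif_neg h]; exact h2 nex (by omega)
  have hdfs : pvDfsA nums m mask =
      (if (((pvFirsts nums mask).length : Nat) : Int) < m then none
       else pvScan (pvCombosP (pvFirsts nums mask) m.toNat) mask dp none) := by
    rw [pvDfsA, if_neg (by omega : ¬ mask = 0), hbuild]
    simp only
    rw [List.length_map]
    by_cases hlt : (((pvFirsts nums mask).length : Nat) : Int) < m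
    · rw [if_pos hlt, if_pos hlt]
    · rw [if_neg hlt, if_neg hlt]
      rw [← pvCombos_map_fst]
      exact pvScan_eq nums m mask dp (pvDictOf (pvFirsts nums mask)) hlook
        (pvCombosP (pvFirsts nums mask) m.toNat) none
        (fun c hc p hp => pvDictOf_getD (pvFirsts nums mask) hnd p
          (pvCombosP_mem m.toNat (pvFirsts nums mask) c hc p hp))
  by_cases hlt : (((pvFirsts nums mask).length : Nat) : Int) < m
  · rw [if_pos hlt] at hdfs
    have hstep : pvStepB nums m dp mask = dp := by
      simp only [pvStepB]; rw [if_pos hlt]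
    rw [hstep]
    refine ⟨rfl, ?_, ?_⟩
    · intro s hs
      rcases Nat.lt_or_ge s mask with h | h
      · exact h1 s h
      · have : s = mask := by omega
        subst this
        rw [h2 s (le_refl _), hdfs]
    · intro s hs; exact h2 s (by omega)
  · rw [if_neg hlt] at hdfs
    have hstep : pvStepB nums m dp mask
        = dp.set mask (pvScan (pvCombosP (pvFirsts nums mask) m.toNat) mask dp none) := by
      simp only [pvStepB]; rw [if_neg hlt]
    rw [hstep]
    refine ⟨by simp, ?_, ?_⟩
    · intro s hs
      rw [pvGetD_set _ _ _ _ hlen]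
      rcases Nat.lt_or_ge s mask with h | h
      · rw [if_neg (by omega)]; exact h1 s h
      · have : s = mask := by omega
        subst this; rw [if_pos rfl, hdfs]
    · intro s hs
      rw [pvGetD_set _ _ _ _ hlen, if_neg (by omega)]
      exact h2 s (by omega)

theorem pvTable_inv (nums : List Int) (m : Int) (full : Nat) :
    ∀ t : Nat, t ≤ full →
      (((List.range' 1 t).foldl (pvStepB nums m)
          ((List.replicate (full + 1) none).set 0 (some 0))).length = full + 1) ∧
      (∀ s : Nat, s ≤ t →
        ((List.range' 1 t).foldl (pvStepB nums m)
          ((List.replicate (full + 1) none).set 0 (some 0))).getD s none = pvDfsA nums m s) ∧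
      (∀ s : Nat, t < s →
        ((List.range' 1 t).foldl (pvStepB nums m)
          ((List.replicate (full + 1) none).set 0 (some 0))).getD s none = none) := by
  intro t
  induction t with
  | zero =>
    intro _
    refine ⟨by simp, ?_, ?_⟩
    · intro s hs
      have hs0 : s = 0 := by omega
      subst hs0
      rw [show List.range' 1 0 = ([] : List Nat) from rfl, List.foldl_nil]
      rw [pvGetD_set _ _ _ _ (by simp), if_pos rfl]
      rw [pvDfsA]
      simp
    · intro s hs
      rw [show List.range' 1 0 = ([] : List Nat) from rfl, List.foldl_nil]
      rw [pvGetD_set _ _ _ _ (by simp), if_neg (by omega)]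
      simp only [List.getD_eq_getElem?_getD, List.getElem?_replicate]
      split <;> rfl
  | succ t ih =>
    intro ht
    obtain ⟨ihlen, ih1, ih2⟩ := ih (by omega)
    have hr : List.range' 1 (t + 1) = List.range' 1 t ++ [1 + t] := by
      simpa using (List.range'_concat (s := 1) (n := t) (step := 1))
    rw [hr, List.foldl_append]
    simp only [List.foldl_cons, List.foldl_nil]
    have e : 1 + t = t + 1 := by omega
    rw [e]
    obtain ⟨clen, c1, c2⟩ := pvStepB_correct nums m _ (t + 1) (by omega) (by omega)
      (fun s hs => ih1 s (by omega)) (fun s hs => ih2 s (by omega))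
    exact ⟨by omega, c1, c2⟩

-- ===== VERDICT (by name: the statement is the Claim_ definition above) =====
theorem lc_1681_spec : Claim_equal_lc_1681 := by
  intro nums k _hdom hpre
  unfold Spec_lc_1681
  obtain ⟨hk0, hdisj⟩ := hpre
  simp only [lc_1681, lc_1681_alt]
  by_cases hk : k ≤ 0
  · have hnd : ¬ ((k : Int) ∣ ((PySem.List.sorted nums id false).length : Int)) := by
      rcases hdisj with h | h
      · omega
      · simpa [PySem.List.length_sorted] using h
    have hmod : PySem.Int.mod (((PySem.List.sorted nums id false).length : Nat) : Int) k ≠ 0 := by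
      rw [Ne, PySem.Int.mod_eq_zero_iff_dvd]; exact hnd
    rw [if_pos hmod, if_pos (Or.inl hk)]
  · by_cases hmod : PySem.Int.mod (((PySem.List.sorted nums id false).length : Nat) : Int) k ≠ 0
    · rw [if_pos hmod, if_pos (Or.inr hmod)]
    · rw [if_neg hmod, if_neg (not_or.mpr ⟨hk, hmod⟩)]
      have hfin := (pvTable_inv (PySem.List.sorted nums id false)
        (PySem.Int.floordiv (((PySem.List.sorted nums id false).length : Nat) : Int) k)
        (1 <<< (PySem.List.sorted nums id false).length - 1)
        (1 <<< (PySem.List.sorted nums id false).length - 1) (le_refl _)).2.1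
        (1 <<< (PySem.List.sorted nums id false).length - 1) (le_refl _)
      rw [hfin]

@[simp] theorem lc_1681_raises : Claim_raises_lc_1681 := by
  unfold Claim_raises_lc_1681
  refine ⟨?_, by decide⟩
  rintro nums k _hdom (rfl | ⟨hk, hdvd, _hne⟩) ⟨hk0, hdisj⟩
  · exact hk0 rfl
  · rcases hdisj with h | h
    · omega
    · exact h hdvd
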